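-- pv_equiv track=rewrite | github.com/jaimes1br/AdventJS-2024 | retos-python/20_faltantes_y_duplicados.py | fix_gift_list
-- ===== SOURCE A (Python) =====
-- def fix_gift_list(received, expected):
--     missing = {}
--     extra = {}
--     obj_received = {}
--     obj_expected = {}
--
--     for gift in received:
--         if gift in obj_received:
--             obj_received[gift] += 1
--         else:
--             obj_received[gift] = 1
--
--     if not expected:
--         for gift, count in obj_received.items():
--             extra[gift] = count
--         return {"missing": missing, "extra": extra}
--
--     for gift in expected:
--         if gift in obj_expected:
--             obj_expected[gift] += 1
--         else:
--             obj_expected[gift] = 1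
--
--     for gift, count_expected in obj_expected.items():
--         count_received = obj_received.get(gift, 0)
--
--         if count_received == 0:
--             missing[gift] = count_expected
--         elif count_expected > count_received:
--             missing[gift] = count_expected - count_received
--         elif count_expected < count_received:
--             extra[gift] = count_received - count_expected
--
--     for gift, count_received in obj_received.items():
--         if gift not in obj_expected:
--             extra[gift] = count_received
--
--     return {"missing": missing, "extra": extra}
-- ===== SOURCE B (Python) =====
-- def fix_gift_list(received, expected):
--     balance = {}
--     for g in expected:
--         balance[g] = balance.get(g, 0) + 1
--     for g in received:
--         balance[g] = balance.get(g, 0) - 1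
--     missing = {g: c for g, c in balance.items() if c > 0}
--     extra = {g: -c for g, c in balance.items() if c < 0}
--     return {"missing": missing, "extra": extra}
-- ===== Notes on version B (the rewrite author's own statement) =====
-- stated objective: alternative
-- what changed: Instead of building two separate counters and comparing them key by key (three-way branch plus a cleanup loop and an empty-expected special case), B maintains ONE signed balance dict (+1 per expected, -1 per received) and reads off missing as its positive entries and extra as the negated negative entries, in a single code path.
import Mathlib
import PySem

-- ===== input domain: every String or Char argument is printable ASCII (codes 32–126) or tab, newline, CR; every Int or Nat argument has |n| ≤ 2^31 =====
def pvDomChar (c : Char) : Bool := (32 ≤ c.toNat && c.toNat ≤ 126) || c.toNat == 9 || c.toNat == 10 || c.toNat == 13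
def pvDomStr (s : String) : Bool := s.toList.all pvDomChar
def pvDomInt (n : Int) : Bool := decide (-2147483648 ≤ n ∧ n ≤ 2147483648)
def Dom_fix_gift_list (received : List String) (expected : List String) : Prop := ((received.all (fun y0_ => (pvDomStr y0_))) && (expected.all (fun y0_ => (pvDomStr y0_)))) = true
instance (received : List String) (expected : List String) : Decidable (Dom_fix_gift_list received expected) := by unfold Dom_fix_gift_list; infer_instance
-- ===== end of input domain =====

-- B replaces A's two counters, three-way per-key comparison, cleanup loop and empty-expected
-- special case by ONE signed balance dict (+1 per expected, -1 per received): missing = its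
-- positive entries, extra = its negated negative entries (objective: alternative).

-- ===== PORT A =====
def fix_gift_list (received : List String) (expected : List String) : List (String × List (String × Int)) :=
  let missing : PySem.Dict String Int := PySem.Dict.empty
  let extra : PySem.Dict String Int := PySem.Dict.empty
  let obj_received : PySem.Dict String Int :=
    received.foldl (fun d gift =>
      if d.contains gift then d.insert gift (d.getD gift 0 + 1) else d.insert gift 1)
      PySem.Dict.empty
  if expected.isEmpty then
    let extra := obj_received.items.foldl (fun e p => e.insert p.1 p.2) extra
    [("missing", missing.items), ("extra", extra.items)]
  else
    let obj_expected : PySem.Dict String Int :=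
      expected.foldl (fun d gift =>
        if d.contains gift then d.insert gift (d.getD gift 0 + 1) else d.insert gift 1)
        PySem.Dict.empty
    let me : PySem.Dict String Int × PySem.Dict String Int :=
      obj_expected.items.foldl (fun me p =>
        let count_received := obj_received.getD p.1 0
        if count_received == 0 then (me.1.insert p.1 p.2, me.2)
        else if p.2 > count_received then (me.1.insert p.1 (p.2 - count_received), me.2)
        else if p.2 < count_received then (me.1, me.2.insert p.1 (count_received - p.2))
        else me)
        (missing, extra)
    let extra := obj_received.items.foldl (fun e p =>
      if !obj_expected.contains p.1 then e.insert p.1 p.2 else e) me.2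
    [("missing", me.1.items), ("extra", extra.items)]

-- ===== PORT B =====
def fix_gift_list_alt (received : List String) (expected : List String) : List (String × List (String × Int)) :=
  let balance : PySem.Dict String Int :=
    expected.foldl (fun d g => d.insert g (d.getD g 0 + 1)) PySem.Dict.empty
  let balance : PySem.Dict String Int :=
    received.foldl (fun d g => d.insert g (d.getD g 0 - 1)) balance
  let missing : PySem.Dict String Int :=
    (balance.items.filter (fun p => p.2 > 0)).foldl
      (fun m p => m.insert p.1 p.2) PySem.Dict.empty
  let extra : PySem.Dict String Int :=
    (balance.items.filter (fun p => p.2 < 0)).foldl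
      (fun m p => m.insert p.1 (-p.2)) PySem.Dict.empty
  [("missing", missing.items), ("extra", extra.items)]

-- ===== PRECONDITION & SPEC =====
def Spec_fix_gift_list (received : List String) (expected : List String) (out : List (String × List (String × Int))) : Prop := out = fix_gift_list_alt received expected
instance (received : List String) (expected : List String) (out : List (String × List (String × Int))) : Decidable (Spec_fix_gift_list received expected out) := by unfold Spec_fix_gift_list; infer_instance

-- ===== CLAIM (what is proved, stated in full; the proofs are below) =====
def Claim_equal_fix_gift_list : Prop := ∀ (received : List String) (expected : List String), Dom_fix_gift_list received expected → Spec_fix_gift_list received expected (fix_gift_list received expected)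

-- ===== LEMMAS AND PROOFS =====

-- A's counting loop (membership test, then += / = 1) builds exactly the counter.
lemma pvCountFold (xs : List String) :
    xs.foldl (fun d gift =>
      if d.contains gift then d.insert gift (d.getD gift 0 + 1) else d.insert gift 1)
      PySem.Dict.empty = PySem.Dict.counter xs := by
  rw [show (fun (d : PySem.Dict String Int) gift =>
        if d.contains gift then d.insert gift (d.getD gift 0 + 1) else d.insert gift 1)
      = (fun d g => d.insert g (d.getD g 0 + 1)) from
    funext fun d => funext fun g => by
      by_cases h : d.contains g
      · simp [h]
      · simp [h, PySem.Dict.getD_of_not_contains d 0 (by simpa using h)]]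
  exact PySem.Dict.foldl_insert_getD_add_one_eq_counter xs

-- every item of a counter carries a count ≥ 1
lemma pvItemsCounterMem {xs : List String} {p : String × Int}
    (hp : p ∈ (PySem.Dict.counter xs).items) :
    p.2 = (xs.count p.1 : Int) ∧ 1 ≤ p.2 := by
  rw [PySem.Dict.items_counter] at hp
  obtain ⟨k, hk, rfl⟩ := List.mem_map.mp hp
  refine ⟨rfl, ?_⟩
  have h1 := List.count_pos_iff.mpr ((PySem.Set.mem_ofList xs k).mp hk)
  show (1 : Int) ≤ (xs.count k : Int)
  exact_mod_cast h1

-- A's three-way pair loop is the two filtered insert folds.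
set_option maxHeartbeats 1000000 in
lemma pvPairFold (r e : List String) :
    (PySem.Dict.counter e).items.foldl
      (fun me p =>
        let cr := (PySem.Dict.counter r).getD p.1 0
        if cr == 0 then (me.1.insert p.1 p.2, me.2)
        else if p.2 > cr then (me.1.insert p.1 (p.2 - cr), me.2)
        else if p.2 < cr then (me.1, me.2.insert p.1 (cr - p.2))
        else me)
      (PySem.Dict.empty, PySem.Dict.empty)
    = (((PySem.Dict.counter e).items.filter
          (fun p => p.2 > (PySem.Dict.counter r).getD p.1 0)).foldl
         (fun d p => d.insert p.1 (p.2 - (PySem.Dict.counter r).getD p.1 0)) PySem.Dict.empty,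
       ((PySem.Dict.counter e).items.filter
          (fun p => p.2 < (PySem.Dict.counter r).getD p.1 0)).foldl
         (fun d p => d.insert p.1 ((PySem.Dict.counter r).getD p.1 0 - p.2)) PySem.Dict.empty) := by
  rw [List.foldl_filter, List.foldl_filter,
      ← PySem.List.foldl_prod_mk
        (fun (m : PySem.Dict String Int) (p : String × Int) =>
          if decide (p.2 > (PySem.Dict.counter r).getD p.1 0) = true
          then m.insert p.1 (p.2 - (PySem.Dict.counter r).getD p.1 0) else m)
        (fun (ex : PySem.Dict String Int) (p : String × Int) =>
          if decide (p.2 < (PySem.Dict.counter r).getD p.1 0) = true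
          then ex.insert p.1 ((PySem.Dict.counter r).getD p.1 0 - p.2) else ex)]
  apply PySem.List.foldl_congr_mem
  intro acc p hp
  obtain ⟨-, hp1⟩ := pvItemsCounterMem hp
  set c := (PySem.Dict.counter r).getD p.1 0 with hc
  have hcr0 : 0 ≤ c := by rw [hc, PySem.Dict.getD_counter]; exact Int.natCast_nonneg _
  split_ifs <;>
    simp_all <;> try omega
  all_goals split_ifs <;> first | rfl | omega

-- building a set commutes with filtering
lemma pvOfListFilter (p : String → Bool) (l : List String) :
    PySem.Set.ofList (l.filter p) = (PySem.Set.ofList l).filter p := by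
  induction l with
  | nil => rfl
  | cons a t ih =>
    by_cases hp : p a = true
    · rw [List.filter_cons_of_pos hp, PySem.Set.ofList_cons, PySem.Set.ofList_cons, ih]
      simp only [PySem.Set.discard, List.filter_cons_of_pos hp, List.filter_filter]
      congr 1
      exact List.filter_congr (fun g _ => Bool.and_comm _ _)
    · have hp' : p a = false := by simpa using hp
      rw [List.filter_cons_of_neg (by simp [hp']), ih, PySem.Set.ofList_cons]
      simp only [PySem.Set.discard, List.filter_cons_of_neg (by simp [hp'] : ¬ p a = true),
        List.filter_filter]
      apply List.filter_congr
      intro g _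
      cases hg : p g with
      | false => simp
      | true =>
        have hga : (g == a) = false := by
          cases h : g == a with
          | false => rfl
          | true => rw [eq_of_beq h, hp'] at hg; exact absurd hg (by simp)
        simp [hga]

-- characterisation of B's subtracting loop: the balance dict's items are the start dict's items
-- with each count decreased, followed by the fresh keys of xs with their negated counts.
lemma pvSubFold (xs : List String) (d : PySem.Dict String Int) (hnd : d.keys.Nodup) :
    (xs.foldl (fun d g => d.insert g (d.getD g 0 - 1)) d).items
    = d.items.map (fun p => (p.1, p.2 - (xs.count p.1 : Int)))
      ++ (PySem.Set.ofList (xs.filter (fun g => !d.contains g))).map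
           (fun g => (g, -(xs.count g : Int))) := by
  induction xs generalizing d with
  | nil => simp
  | cons x t ih =>
    simp only [List.foldl_cons]
    by_cases hc : d.contains x = true
    · have hk : (d.insert x (d.getD x 0 - 1)).keys = d.keys :=
        PySem.Dict.keys_insert_of_contains d _ hc
      rw [ih _ (hk ▸ hnd)]
      congr 1
      · rw [PySem.Dict.items_insert_of_contains d _ hc, List.map_map]
        apply List.map_congr_left
        intro p hp
        simp only [Function.comp]
        by_cases hpx : p.1 = x
        · rw [if_pos (by simpa using hpx)]
          have hgd : d.getD x 0 = p.2 := by
            exact PySem.Dict.getD_of_mem_items d (show (x, p.2) ∈ d.items from hpx ▸ hp) hnd 0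
          rw [hgd, hpx, List.count_cons_self]
          have hv : p.2 - 1 - (t.count x : Int) = p.2 - ((t.count x : Nat) + 1 : Nat) := by
            push_cast; ring
          rw [hv]
        · rw [if_neg (by simpa using hpx)]
          have hcnt : List.count p.1 (x :: t) = List.count p.1 t := by
            rw [List.count_cons, if_neg (by simpa using fun h => hpx ((eq_of_beq h).symm))]
            simp
          rw [hcnt]
      · have hfilt : (t.filter (fun g => !(d.insert x (d.getD x 0 - 1)).contains g))
            = t.filter (fun g => !d.contains g) := by
          apply List.filter_congr
          intro g _
          rw [PySem.Dict.contains_insert]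
          cases h : g == x with
          | true => rw [eq_of_beq h, hc]; simp
          | false => simp
        rw [hfilt, List.filter_cons_of_neg (by simp [hc])]
        apply List.map_congr_left
        intro g hg
        have hgc : d.contains g = false := by
          simpa using (List.mem_filter.mp ((PySem.Set.mem_ofList _ g).mp hg)).2
        have hgx : (x == g) = false := by
          cases h : x == g with
          | false => rfl
          | true => rw [← eq_of_beq h, hc] at hgc; exact absurd hgc (by simp)
        rw [List.count_cons, if_neg (by simp [hgx])]
        simp
    · have hc' : d.contains x = false := by simpa using hc
      have hnd' : (d.insert x (d.getD x 0 - 1)).keys.Nodup :=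
        PySem.Dict.nodup_keys_insert d _ _ hnd
      rw [ih _ hnd']
      have hxk : x ∉ d.keys := fun h => by
        rw [(PySem.Dict.contains_iff_mem_keys d x).mpr h] at hc'
        exact absurd hc' (by simp)
      have hfilt : (t.filter (fun g => !(d.insert x (d.getD x 0 - 1)).contains g))
          = (t.filter (fun g => !d.contains g)).filter (fun g => !(g == x)) := by
        rw [List.filter_filter]
        apply List.filter_congr
        intro g _
        rw [PySem.Dict.contains_insert]
        cases h : g == x <;> simp
      rw [hfilt,
          PySem.Dict.items_insert_of_not_contains d _ hc',
          PySem.Dict.getD_of_not_contains d 0 hc',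
          List.filter_cons_of_pos (by simp [hc']),
          PySem.Set.ofList_cons]
      simp only [PySem.Set.discard]
      rw [← pvOfListFilter, List.filter_filter, List.map_append, List.map_cons, List.append_assoc]
      congr 1
      · apply List.map_congr_left
        intro p hp
        have hpx : (x == p.1) = false := by
          cases h : x == p.1 with
          | false => rfl
          | true =>
            exact absurd (PySem.Dict.mem_keys_of_mem_items d hp) ((eq_of_beq h) ▸ hxk)
        rw [List.count_cons, if_neg (by simp [hpx])]
        simp
      · rw [List.map_cons]
        simp only [List.map_nil, List.cons_append, List.nil_append]
        congr 1
        · simp [List.count_cons_self]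
          ring
        · apply List.map_congr_left
          intro g hg
          have hgx : (x == g) = false := by
            have hm := (List.mem_filter.mp ((PySem.Set.mem_ofList _ g).mp hg)).2
            have hne : (g == x) = false := by
              cases h : g == x with
              | false => rfl
              | true => simp [h] at hm
            cases h : x == g with
            | false => rfl
            | true => rw [eq_of_beq h] at hne; simp at hne
          rw [List.count_cons, if_neg (by simp [hgx])]
          simp

-- B's missing comprehension over the balance items is A's missing fold.
lemma pvMissingB (r e : List String) :
    (((PySem.Dict.counter e).items.map (fun p => (p.1, p.2 - (r.count p.1 : Int)))
       ++ (PySem.Set.ofList (r.filter (fun g => !(PySem.Dict.counter e).contains g))).map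
            (fun g => (g, -(r.count g : Int)))).filter (fun p => p.2 > 0)).foldl
      (fun m p => m.insert p.1 p.2) PySem.Dict.empty
    = ((PySem.Dict.counter e).items.filter
         (fun p => p.2 > (PySem.Dict.counter r).getD p.1 0)).foldl
        (fun d p => d.insert p.1 (p.2 - (PySem.Dict.counter r).getD p.1 0)) PySem.Dict.empty := by
  rw [List.filter_append]
  have h2 : ((PySem.Set.ofList (r.filter (fun g => !(PySem.Dict.counter e).contains g))).map
      (fun g => (g, -(r.count g : Int)))).filter (fun p => p.2 > 0) = [] := by
    apply List.filter_eq_nil_iff.mpr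
    intro p hp
    obtain ⟨g, hg, rfl⟩ := List.mem_map.mp hp
    have hgr : g ∈ r := List.mem_of_mem_filter ((PySem.Set.mem_ofList _ g).mp hg)
    have h1 : 0 < List.count g r := List.count_pos_iff.mpr hgr
    simp only [gt_iff_lt, decide_eq_true_eq]
    omega
  rw [h2, List.append_nil, List.filter_map, List.foldl_map]
  simp only [PySem.Dict.getD_counter, Function.comp_def]
  congr 1
  apply List.filter_congr
  intro p _
  rw [decide_eq_decide]
  omega

-- A's cleanup loop over the received counter is B's fold over the fresh keys of received.
lemma pvCleanupLoop (r e : List String) (d0 : PySem.Dict String Int) :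
    (PySem.Dict.counter r).items.foldl
      (fun ex p => if !(PySem.Dict.counter e).contains p.1 then ex.insert p.1 p.2 else ex) d0
    = (PySem.Set.ofList (r.filter (fun g => !(PySem.Dict.counter e).contains g))).foldl
        (fun m g => m.insert g ((r.count g : Int))) d0 := by
  rw [PySem.Dict.items_counter, List.foldl_map, pvOfListFilter, List.foldl_filter]

-- B's extra comprehension over the balance items is A's pair-loop extra followed by A's cleanup loop.
lemma pvExtraB (r e : List String) :
    (((PySem.Dict.counter e).items.map (fun p => (p.1, p.2 - (r.count p.1 : Int)))
       ++ (PySem.Set.ofList (r.filter (fun g => !(PySem.Dict.counter e).contains g))).map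
            (fun g => (g, -(r.count g : Int)))).filter (fun p => p.2 < 0)).foldl
      (fun m p => m.insert p.1 (-p.2)) PySem.Dict.empty
    = (PySem.Dict.counter r).items.foldl
        (fun ex p => if !(PySem.Dict.counter e).contains p.1 then ex.insert p.1 p.2 else ex)
        (((PySem.Dict.counter e).items.filter
            (fun p => p.2 < (PySem.Dict.counter r).getD p.1 0)).foldl
          (fun d p => d.insert p.1 ((PySem.Dict.counter r).getD p.1 0 - p.2)) PySem.Dict.empty) := by
  rw [pvCleanupLoop, List.filter_append, List.foldl_append]
  have h2 : ((PySem.Set.ofList (r.filter (fun g => !(PySem.Dict.counter e).contains g))).map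
      (fun g => (g, -(r.count g : Int)))).filter (fun p => p.2 < 0)
      = (PySem.Set.ofList (r.filter (fun g => !(PySem.Dict.counter e).contains g))).map
      (fun g => (g, -(r.count g : Int))) := by
    apply List.filter_eq_self.mpr
    intro p hp
    obtain ⟨g, hg, rfl⟩ := List.mem_map.mp hp
    have hgr : g ∈ r := List.mem_of_mem_filter ((PySem.Set.mem_ofList _ g).mp hg)
    have h1 : 0 < List.count g r := List.count_pos_iff.mpr hgr
    simp only [decide_eq_true_eq]
    omega
  rw [h2, List.filter_map, List.foldl_map, List.foldl_map]
  simp only [PySem.Dict.getD_counter, Function.comp_def, neg_sub, neg_neg]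
  congr 1
  congr 1
  apply List.filter_congr
  intro p _
  rw [decide_eq_decide]
  omega

-- ===== VERDICT (by name: the statement is the Claim_ definition above) =====
theorem fix_gift_list_spec : Claim_equal_fix_gift_list := by
  intro received expected _
  unfold Spec_fix_gift_list fix_gift_list fix_gift_list_alt
  simp only [pvCountFold, PySem.Dict.foldl_insert_getD_add_one_eq_counter]
  rw [pvSubFold received (PySem.Dict.counter expected) (PySem.Dict.nodup_keys_counter expected)]
  by_cases hE : expected.isEmpty
  · obtain rfl := List.isEmpty_iff.mp hE
    rw [if_pos (show ([] : List String).isEmpty = true from rfl)]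
    rw [show PySem.Dict.counter ([] : List String) = PySem.Dict.empty from rfl]
    simp only [show (PySem.Dict.empty : PySem.Dict String Int).items = [] from rfl,
      List.map_nil, List.nil_append,
      List.filter_eq_self.mpr (fun (g : String) _ => by
        simp [PySem.Dict.contains_empty] : ∀ g ∈ received, (!(PySem.Dict.empty : PySem.Dict String Int).contains g) = true)]
    have hneg : ∀ p ∈ (PySem.Set.ofList received).map (fun g => (g, -(received.count g : Int))),
        p.2 < 0 := by
      intro p hp
      obtain ⟨g, hg, rfl⟩ := List.mem_map.mp hp
      have := List.count_pos_iff.mpr ((PySem.Set.mem_ofList received g).mp hg)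
      simp only [Left.neg_neg_iff]
      exact_mod_cast this
    rw [List.filter_eq_nil_iff.mpr (fun p hp => by
          have := hneg p hp; simp only [decide_eq_true_eq]; omega),
        List.filter_eq_self.mpr (fun p hp => by
          have := hneg p hp; simp only [decide_eq_true_eq]; omega),
        List.foldl_nil, List.foldl_map,
        PySem.Dict.items_counter, List.foldl_map]
    simp
    rfl
  · rw [if_neg hE, pvPairFold received expected]
    rw [pvMissingB received expected, pvExtraB received expected]
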